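-- pv_equiv track=rewrite | github.com/waynegault/ancestry | gedcom_utils.py | _are_cousins
-- ===== SOURCE A (Python) =====
-- def _are_cousins(
--     id1: str,
--     id2: str,
--     id_to_parents: dict[str, set[str]],
-- ) -> bool:
--     """Check if id1 and id2 are cousins (children of siblings)."""
--     # Get parents of id1 and id2
--     parents1 = id_to_parents.get(id1, set())
--     parents2 = id_to_parents.get(id2, set())
--
--     # For each parent of id1, check if they have a sibling who is a parent of id2
--     for parent1 in parents1:
--         # Get grandparents of id1
--         grandparents1 = id_to_parents.get(parent1, set())
--
--         for parent2 in parents2: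
--             # Get grandparents of id2
--             grandparents2 = id_to_parents.get(parent2, set())
--
--             # If they share a grandparent but have different parents, they're cousins
--             if (
--                 grandparents1
--                 and grandparents2
--                 and not grandparents1.isdisjoint(grandparents2)
--             ) and (
--                 parent1 != parent2
--             ):  # Make sure they don't have the same parent (which would make them siblings)
--                 return True
--
--     return False
-- ===== SOURCE B (Python) =====
-- def _are_cousins(
--     id1: str,
--     id2: str,
--     id_to_parents: dict[str, set[str]],
-- ) -> bool:
--     """Check if id1 and id2 are cousins (children of siblings)."""
--     # Index: grandparent id -> set of parents of id2 having that grandparent.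
--     gp_index: dict[str, set[str]] = {}
--     for parent2 in id_to_parents.get(id2, set()):
--         for gp in id_to_parents.get(parent2, set()):
--             gp_index.setdefault(gp, set()).add(parent2)
--     # For each parent of id1, look its grandparents up in the index: a hit
--     # via a parent of id2 other than parent1 itself means they are cousins.
--     for parent1 in id_to_parents.get(id1, set()):
--         for gp in id_to_parents.get(parent1, set()):
--             owners = gp_index.get(gp)
--             if owners is not None and owners - {parent1}:
--                 return True
--     return False
-- ===== Notes on version B (the rewrite author's own statement) =====
-- stated objective: alternative
-- what changed: Replaces the nested parents1 x parents2 scan with a grandparent->parents2 index dict built once, so each grandparent of a parent1 is answered by one dict lookup plus a set-difference test against {parent1}; a timing run measured no significant speed difference on the generated inputs.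
import Mathlib
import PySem

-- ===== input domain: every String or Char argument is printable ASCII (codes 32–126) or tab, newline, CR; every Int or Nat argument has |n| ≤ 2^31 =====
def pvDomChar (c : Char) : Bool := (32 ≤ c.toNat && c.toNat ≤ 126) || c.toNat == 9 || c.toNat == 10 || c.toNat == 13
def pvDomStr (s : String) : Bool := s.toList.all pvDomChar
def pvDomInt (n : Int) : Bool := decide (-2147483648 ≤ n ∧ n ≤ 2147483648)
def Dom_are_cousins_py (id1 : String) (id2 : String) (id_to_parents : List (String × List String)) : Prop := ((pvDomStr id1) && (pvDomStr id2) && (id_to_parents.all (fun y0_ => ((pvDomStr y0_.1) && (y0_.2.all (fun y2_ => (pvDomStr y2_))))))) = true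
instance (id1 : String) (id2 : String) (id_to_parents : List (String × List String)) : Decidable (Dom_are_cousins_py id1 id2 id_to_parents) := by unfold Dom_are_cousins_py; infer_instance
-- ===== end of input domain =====

-- B builds a grandparent -> {parents of id2} index dict once, replacing A's nested
-- parents1 x parents2 scan; objective: alternative (index lookup instead of an inner scan).

-- shared helper: id_to_parents.get(k, set())  (first-match association lookup)
def pvGetParents (d : List (String × List String)) (k : String) : List String :=
  (PySem.Dict.mk d).getD k PySem.Set.empty

-- ===== PORT A =====
def are_cousins_py (id1 : String) (id2 : String) (id_to_parents : List (String × List String)) : Bool :=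
  let parents1 := pvGetParents id_to_parents id1
  let parents2 := pvGetParents id_to_parents id2
  parents1.any (fun parent1 =>
    let grandparents1 := pvGetParents id_to_parents parent1
    parents2.any (fun parent2 =>
      let grandparents2 := pvGetParents id_to_parents parent2
      (!grandparents1.isEmpty && !grandparents2.isEmpty &&
        !(PySem.Set.isdisjoint grandparents1 grandparents2)) && (parent1 != parent2)))

-- ===== PORT B =====
-- gp_index: for each parent2 of id2, add parent2 to the bucket of each of its parents
def pvGpIndex (d : List (String × List String)) (parents2 : List String) :
    PySem.Dict String (PySem.Set String) :=
  parents2.foldl (fun idx parent2 =>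
    (pvGetParents d parent2).foldl (fun idx gp =>
      idx.insert gp (PySem.Set.add (idx.getD gp PySem.Set.empty) parent2)) idx)
    PySem.Dict.empty

def are_cousins_py_alt (id1 : String) (id2 : String) (id_to_parents : List (String × List String)) : Bool :=
  let gpIndex := pvGpIndex id_to_parents (pvGetParents id_to_parents id2)
  (pvGetParents id_to_parents id1).any (fun parent1 =>
    (pvGetParents id_to_parents parent1).any (fun gp =>
      match gpIndex.get? gp with
      | none => false
      | some owners => !(PySem.Set.diff owners [parent1]).isEmpty))

-- ===== PRECONDITION & SPEC =====
def Spec_are_cousins_py (id1 : String) (id2 : String) (id_to_parents : List (String × List String)) (out : Bool) : Prop := out = are_cousins_py_alt id1 id2 id_to_parents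
instance (id1 : String) (id2 : String) (id_to_parents : List (String × List String)) (out : Bool) : Decidable (Spec_are_cousins_py id1 id2 id_to_parents out) := by unfold Spec_are_cousins_py; infer_instance

-- ===== CLAIM (what is proved, stated in full; the proofs are below) =====
def Claim_equal_are_cousins_py : Prop := ∀ (id1 : String) (id2 : String) (id_to_parents : List (String × List String)), Dom_are_cousins_py id1 id2 id_to_parents → Spec_are_cousins_py id1 id2 id_to_parents (are_cousins_py id1 id2 id_to_parents)

-- ===== LEMMAS AND PROOFS =====

-- membership after the inner loop (adding parent2 to the bucket of every gp' in gps)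
theorem pv_mem_inner (gps : List String) (idx : PySem.Dict String (PySem.Set String))
    (p2 x gp : String) :
    x ∈ (gps.foldl (fun idx gp' =>
          idx.insert gp' (PySem.Set.add (idx.getD gp' PySem.Set.empty) p2)) idx).getD gp PySem.Set.empty
      ↔ x ∈ idx.getD gp PySem.Set.empty ∨ (gp ∈ gps ∧ x = p2) := by
  induction gps generalizing idx with
  | nil => simp
  | cons g gps ih =>
    simp only [List.foldl_cons]
    rw [ih, PySem.Dict.getD_insert]
    by_cases h : gp = g <;> simp [h, PySem.Set.mem_add] <;> tauto

-- membership in the built index: x owns gp iff x is a parent2 whose parents contain gp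
theorem pv_mem_index (d : List (String × List String)) (ps : List String) (x gp : String) :
    x ∈ (pvGpIndex d ps).getD gp PySem.Set.empty
      ↔ ∃ p2 ∈ ps, gp ∈ pvGetParents d p2 ∧ x = p2 := by
  unfold pvGpIndex
  suffices h : ∀ idx : PySem.Dict String (PySem.Set String),
      x ∈ (ps.foldl (fun idx parent2 =>
            (pvGetParents d parent2).foldl (fun idx gp' =>
              idx.insert gp' (PySem.Set.add (idx.getD gp' PySem.Set.empty) parent2)) idx) idx).getD gp PySem.Set.empty
        ↔ x ∈ idx.getD gp PySem.Set.empty ∨ ∃ p2 ∈ ps, gp ∈ pvGetParents d p2 ∧ x = p2 by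
    rw [h]; simp [PySem.Set.empty]
  intro idx
  induction ps generalizing idx with
  | nil => simp
  | cons p ps ih =>
    simp only [List.foldl_cons]
    rw [ih, pv_mem_inner]
    constructor
    · rintro (((h | ⟨h1, h2⟩) ) | ⟨p2, hp2, hgp, hx⟩)
      · exact Or.inl h
      · exact Or.inr ⟨p, by simp, h1, h2⟩
      · exact Or.inr ⟨p2, by simp [hp2], hgp, hx⟩
    · rintro (h | ⟨p2, hp2, hgp, hx⟩)
      · exact Or.inl (Or.inl h)
      · rcases List.mem_cons.mp hp2 with h | h
        · subst h; exact Or.inl (Or.inr ⟨hgp, hx⟩)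
        · exact Or.inr ⟨p2, h, hgp, hx⟩

-- the match on get? equals the getD formulation
theorem pv_match_getD (idx : PySem.Dict String (PySem.Set String)) (gp p1 : String) :
    (match idx.get? gp with
     | none => false
     | some owners => !(PySem.Set.diff owners [p1]).isEmpty)
      = !(PySem.Set.diff (idx.getD gp PySem.Set.empty) [p1]).isEmpty := by
  rw [PySem.Dict.getD_eq_get?_getD]
  cases h : idx.get? gp
  · simp [PySem.Set.diff, PySem.Set.empty]
  · simp

-- A's loop condition, as a proposition (the nonemptiness tests are subsumed by the shared member)
theorem pv_cond_iff (g1 g2 : List String) (p1 p2 : String) :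
    ((!g1.isEmpty && !g2.isEmpty && !(PySem.Set.isdisjoint g1 g2)) && (p1 != p2)) = true
      ↔ (∃ g ∈ g1, g ∈ g2) ∧ p1 ≠ p2 := by
  simp only [Bool.and_eq_true, Bool.not_eq_true', bne_iff_ne,
    ne_eq, Bool.eq_false_iff, PySem.Set.isdisjoint_iff, not_forall, not_not, exists_prop]
  constructor
  · rintro ⟨⟨_, g, hg1, hg2⟩, hne⟩
    exact ⟨⟨g, hg1, hg2⟩, hne⟩
  · rintro ⟨⟨g, hg1, hg2⟩, hne⟩
    refine ⟨⟨⟨?_, ?_⟩, g, hg1, hg2⟩, hne⟩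
    · simp only [List.isEmpty_iff]; exact List.ne_nil_of_mem hg1
    · simp only [List.isEmpty_iff]; exact List.ne_nil_of_mem hg2

-- B's loop condition, as a proposition
theorem pv_hit_iff (d : List (String × List String)) (ps : List String) (gp p1 : String) :
    ((!(PySem.Set.diff ((pvGpIndex d ps).getD gp PySem.Set.empty) [p1]).isEmpty) = true)
      ↔ ∃ p2 ∈ ps, gp ∈ pvGetParents d p2 ∧ p2 ≠ p1 := by
  simp only [Bool.not_eq_true', List.isEmpty_eq_false_iff_exists_mem, PySem.Set.mem_diff,
    pv_mem_index, List.mem_singleton]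
  aesop

-- ===== VERDICT (by name: the statement is the Claim_ definition above) =====
theorem are_cousins_py_spec : Claim_equal_are_cousins_py := by
  intro id1 id2 d _
  unfold Spec_are_cousins_py are_cousins_py are_cousins_py_alt
  simp only [pv_match_getD]
  rw [Bool.eq_iff_iff]
  simp only [List.any_eq_true, pv_cond_iff, pv_hit_iff]
  constructor
  · rintro ⟨p1, hp1, p2, hp2, ⟨g, hg1, hg2⟩, hne⟩
    exact ⟨p1, hp1, g, hg1, p2, hp2, hg2, Ne.symm hne⟩
  · rintro ⟨p1, hp1, g, hg1, p2, hp2, hg2, hne⟩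
    exact ⟨p1, hp1, p2, hp2, ⟨g, hg1, hg2⟩, Ne.symm hne⟩
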